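-- pv_equiv track=rewrite | github.com/wyk18703232953/myResearch | codeComplex/data/onlyCode/python/np/python_np_0222.py | check_combos
-- ===== SOURCE A (Python) =====
-- def check_combos(diff,n,size,start,picked,total,l,r,x,combination = []):
--     if picked == size:
--         if max(combination) - min(combination) >= x and l <= sum(combination) <= r:
--             total += 1
--     else:
--         for i in range(start,n-(size-picked-1)):
--             combination.append(diff[i])
--             picked += 1
--             total = check_combos(diff,n,size,i+1,picked,total,l,r,x,combination)
--             picked -= 1
--             combination.pop()
--     return total
-- ===== SOURCE B (Python) =====
-- def check_combos(diff, n, size, start, picked, total, l, r, x, combination=[]):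
--     # take/skip binary recursion carrying (sum, min, max) aggregates incrementally.
--     k = size - picked
--     if k < 0:
--         return total
--     s0 = sum(combination)
--     have0 = len(combination) > 0
--     mn0 = min(combination) if have0 else 0
--     mx0 = max(combination) if have0 else 0
--
--     def go(pos, rem, s, mn, mx, have):
--         if rem == 0:
--             return 1 if (have and mx - mn >= x and l <= s <= r) else 0
--         if n - pos < rem:
--             return 0
--         v = diff[pos]
--         taken = go(pos + 1, rem - 1, s + v,
--                    (mn if mn < v else v) if have else v,
--                    (mx if mx > v else v) if have else v, True)
--         return taken + go(pos + 1, rem, s, mn, mx, have)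
--
--     return total + go(start, k, s0, mn0, mx0, have0)
-- ===== Notes on version B (the rewrite author's own statement) =====
-- stated objective: alternative
-- what changed: Replaces A's loop-of-recursive-calls that mutates a shared combination list and recomputes max/min/sum over the whole list at each completed combination with a take/skip binary recursion that carries the (sum, min, max) aggregates incrementally and never builds the combinations.
import Mathlib
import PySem

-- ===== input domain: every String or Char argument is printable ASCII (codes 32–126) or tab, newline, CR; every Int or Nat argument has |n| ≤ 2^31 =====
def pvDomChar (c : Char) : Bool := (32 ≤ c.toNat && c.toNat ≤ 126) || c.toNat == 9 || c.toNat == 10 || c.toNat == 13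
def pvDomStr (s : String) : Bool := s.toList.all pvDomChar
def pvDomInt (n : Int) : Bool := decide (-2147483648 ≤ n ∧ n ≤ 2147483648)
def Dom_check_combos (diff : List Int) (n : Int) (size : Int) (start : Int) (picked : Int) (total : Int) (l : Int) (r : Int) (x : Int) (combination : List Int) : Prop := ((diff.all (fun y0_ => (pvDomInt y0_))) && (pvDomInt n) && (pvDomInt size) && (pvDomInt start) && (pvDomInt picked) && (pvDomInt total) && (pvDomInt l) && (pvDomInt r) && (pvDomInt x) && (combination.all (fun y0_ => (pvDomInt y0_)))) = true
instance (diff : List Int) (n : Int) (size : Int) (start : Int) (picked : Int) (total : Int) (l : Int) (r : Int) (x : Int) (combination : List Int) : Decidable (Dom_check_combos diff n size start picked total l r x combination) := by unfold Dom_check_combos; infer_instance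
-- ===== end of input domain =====

-- B replaces A's loop-of-recursive-calls over index ranges (building the combination list and
-- recomputing max/min/sum at each completed combination) by a take/skip binary recursion that
-- carries the (sum, min, max) aggregates incrementally; equal return value on Pre_ (A does a
-- no-net append/pop mutation of `combination`; B does not mutate it).

-- ===== PORT A =====
def pvMinD (c : List Int) : Int := (PySem.List.min? c (fun y => y)).getD 0
def pvMaxD (c : List Int) : Int := (PySem.List.max? c (fun y => y)).getD 0
-- max(combination) - min(combination) >= x and l <= sum(combination) <= r  (comb nonempty under Pre_)
def pvCond (l r x : Int) (c : List Int) : Bool :=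
  decide (x ≤ pvMaxD c - pvMinD c) && decide (l ≤ c.sum) && decide (c.sum ≤ r)

-- fuel = recursion depth bound; (size - picked).toNat + 1 suffices wherever Python A returns
def pvGoA (diff : List Int) (n size l r x : Int) : Nat → Int → Int → Int → List Int → Int
  | 0, _, _, total, _ => total
  | fuel+1, start, picked, total, comb =>
    if picked == size then
      (if pvCond l r x comb then total + 1 else total)
    else
      (PySem.List.pyRange start (n - (size - picked - 1)) 1).foldl
        (fun t i => pvGoA diff n size l r x fuel (i+1) (picked+1) t
          (comb ++ [PySem.List.pyGetD diff i 0])) total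

def check_combos (diff : List Int) (n : Int) (size : Int) (start : Int) (picked : Int) (total : Int) (l : Int) (r : Int) (x : Int) (combination : List Int) : Int :=
  pvGoA diff n size l r x ((size - picked).toNat + 1) start picked total combination

-- ===== PORT B =====
-- take/skip recursion of Source B's inner go(); rem is a Nat (go is only entered with k ≥ 0)
def pvGoB (diff : List Int) (n l r x : Int) (pos : Int) (rem : Nat) (s mn mx : Int) (hv : Bool) : Int :=
  match rem with
  | 0 => if hv && decide (x ≤ mx - mn) && decide (l ≤ s) && decide (s ≤ r) then 1 else 0
  | rem'+1 =>
    if n - pos < (rem' : Int) + 1 then 0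
    else
      let v := PySem.List.pyGetD diff pos 0
      pvGoB diff n l r x (pos+1) rem' (s+v)
        (if hv then (if mn < v then mn else v) else v)
        (if hv then (if mx > v then mx else v) else v) true
      + pvGoB diff n l r x (pos+1) (rem'+1) s mn mx hv
termination_by (n - pos).toNat
decreasing_by all_goals omega

def check_combos_alt (diff : List Int) (n : Int) (size : Int) (start : Int) (picked : Int) (total : Int) (l : Int) (r : Int) (x : Int) (combination : List Int) : Int :=
  if size - picked < 0 then total
  else
    let s0 := combination.sum
    let have0 := decide (0 < combination.length)
    let mn0 := if have0 then (PySem.List.min? combination (fun y => y)).getD 0 else 0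
    let mx0 := if have0 then (PySem.List.max? combination (fun y => y)).getD 0 else 0
    total + pvGoB diff n l r x start (size - picked).toNat s0 mn0 mx0 have0

-- ===== PRECONDITION & SPEC =====
-- Pre_ = exactly the inputs where Python A returns: it raises ValueError (max of empty list)
-- when picked == size with empty combination, and otherwise raises IndexError (or exhausts the
-- recursion) exactly when the pruned index range is nonempty but reaches an index outside
-- [-len(diff), len(diff)).
def Pre_check_combos (diff : List Int) (n : Int) (size : Int) (start : Int) (picked : Int) (total : Int) (l : Int) (r : Int) (x : Int) (combination : List Int) : Prop :=
  (picked = size → combination ≠ []) ∧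
  (size < picked → n - (size - picked - 1) ≤ start) ∧
  (picked < size → (n - start < size - picked) ∨ (-(diff.length : Int) ≤ start ∧ n ≤ (diff.length : Int)))
instance (diff : List Int) (n : Int) (size : Int) (start : Int) (picked : Int) (total : Int) (l : Int) (r : Int) (x : Int) (combination : List Int) : Decidable (Pre_check_combos diff n size start picked total l r x combination) := by unfold Pre_check_combos; infer_instance

def pvWitness_check_combos : List Int × Int × Int × Int × Int × Int × Int × Int × Int × List Int :=
  ([1, 2, 3], 3, 2, 0, 0, 0, 0, 10, 1, [])

def Spec_check_combos (diff : List Int) (n : Int) (size : Int) (start : Int) (picked : Int) (total : Int) (l : Int) (r : Int) (x : Int) (combination : List Int) (out : Int) : Prop := out = check_combos_alt diff n size start picked total l r x combination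
instance (diff : List Int) (n : Int) (size : Int) (start : Int) (picked : Int) (total : Int) (l : Int) (r : Int) (x : Int) (combination : List Int) (out : Int) : Decidable (Spec_check_combos diff n size start picked total l r x combination out) := by unfold Spec_check_combos; infer_instance

-- ===== CLAIM (what is proved, stated in full; the proofs are below) =====
def Claim_equal_check_combos : Prop := ∀ (diff : List Int) (n : Int) (size : Int) (start : Int) (picked : Int) (total : Int) (l : Int) (r : Int) (x : Int) (combination : List Int), Dom_check_combos diff n size start picked total l r x combination → Pre_check_combos diff n size start picked total l r x combination → Spec_check_combos diff n size start picked total l r x combination (check_combos diff n size start picked total l r x combination)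

-- ===== LEMMAS AND PROOFS =====

-- common spec: number of ways to extend comb by rem picks with increasing indices from pos
def pvN (diff : List Int) (n l r x : Int) : Nat → Int → List Int → Int
  | 0, _, comb => if pvCond l r x comb then 1 else 0
  | rem+1, pos, comb =>
      ((PySem.List.pyRange pos (n - (rem : Int)) 1).map
        (fun i => pvN diff n l r x rem (i+1) (comb ++ [PySem.List.pyGetD diff i 0]))).sum

lemma pv_foldl_eq_sum {f : Int → Int → Int} {g : Int → Int}
    (hf : ∀ t i, f t i = t + g i) :
    ∀ (L : List Int) (a : Int), L.foldl f a = a + (L.map g).sum := by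
  intro L
  induction L with
  | nil => intro a; simp
  | cons h t ih => intro a; simp [List.foldl_cons, hf, ih, add_assoc]

lemma pvMinD_append (c : List Int) (v : Int) :
    pvMinD (c ++ [v]) = if c = [] then v else min (pvMinD c) v := by
  cases c with
  | nil => simp [pvMinD, PySem.List.min?_id_cons]
  | cons h t =>
    simp [pvMinD, List.cons_append, PySem.List.min?_id_cons, List.foldl_append]

lemma pvMaxD_append (c : List Int) (v : Int) :
    pvMaxD (c ++ [v]) = if c = [] then v else max (pvMaxD c) v := by
  cases c with
  | nil => simp [pvMaxD, PySem.List.max?_id_cons]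
  | cons h t =>
    simp [pvMaxD, List.cons_append, PySem.List.max?_id_cons, List.foldl_append]

lemma pv_lemA (diff : List Int) (n size l r x : Int) :
    ∀ (k : Nat) (start picked total : Int) (comb : List Int),
      size - picked = (k : Int) →
      pvGoA diff n size l r x (k+1) start picked total comb
        = total + pvN diff n l r x k start comb := by
  intro k
  induction k with
  | zero =>
    intro start picked total comb hk
    have hps : picked = size := by omega
    simp [pvGoA, pvN, hps]
    split <;> simp
  | succ k ih =>
    intro start picked total comb hk
    have hne : ¬ (picked == size) = true := by simp; omega
    have hb : n - (size - picked - 1) = n - (k : Int) := by push_cast at hk ⊢; omega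
    simp only [pvGoA, hne, Bool.false_eq_true, if_false, hb, pvN]
    exact pv_foldl_eq_sum
      (fun t i => ih (i+1) (picked+1) t (comb ++ [PySem.List.pyGetD diff i 0]) (by omega)) _ _

lemma pv_lemB (diff : List Int) (n l r x : Int) :
    ∀ (m rem : Nat) (pos : Int), (n - pos).toNat ≤ m →
    ∀ (comb : List Int) (s mn mx : Int) (hv : Bool),
      s = comb.sum →
      (hv = true ↔ comb ≠ []) →
      (comb ≠ [] → mn = pvMinD comb ∧ mx = pvMaxD comb) →
      (rem = 0 → comb ≠ []) →
      pvGoB diff n l r x pos rem s mn mx hv = pvN diff n l r x rem pos comb := by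
  intro m
  induction m with
  | zero =>
    intro rem pos hm comb s mn mx hv hs hhv hmn h0
    cases rem with
    | zero =>
      have hc := h0 rfl
      obtain ⟨h1, h2⟩ := hmn hc
      simp [pvGoB, pvN, pvCond, hhv.mpr hc, hs, h1, h2]
    | succ rem' =>
      have hlt : n - pos < (rem' : Int) + 1 := by omega
      have hnil : PySem.List.pyRange pos (n - (rem' : Int)) 1 = [] :=
        PySem.List.pyRange_one_eq_nil (by omega)
      simp [pvGoB, pvN, hlt, hnil]
  | succ m ih =>
    intro rem pos hm comb s mn mx hv hs hhv hmn h0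
    cases rem with
    | zero =>
      have hc := h0 rfl
      obtain ⟨h1, h2⟩ := hmn hc
      simp [pvGoB, pvN, pvCond, hhv.mpr hc, hs, h1, h2]
    | succ rem' =>
      by_cases hlt : n - pos < (rem' : Int) + 1
      · have hnil : PySem.List.pyRange pos (n - (rem' : Int)) 1 = [] :=
          PySem.List.pyRange_one_eq_nil (by omega)
        simp [pvGoB, pvN, hlt, hnil]
      · have hcons : PySem.List.pyRange pos (n - (rem' : Int)) 1
            = pos :: PySem.List.pyRange (pos+1) (n - (rem' : Int)) 1 :=
          PySem.List.pyRange_one_cons (by omega)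
        set v := PySem.List.pyGetD diff pos 0 with hv_def
        have hcne : comb ++ [v] ≠ [] := by simp
        have htake : pvGoB diff n l r x (pos+1) rem' (s+v)
              (if hv then (if mn < v then mn else v) else v)
              (if hv then (if mx > v then mx else v) else v) true
            = pvN diff n l r x rem' (pos+1) (comb ++ [v]) := by
          apply ih rem' (pos+1) (by omega)
          · simp [hs]
          · simp [hcne]
          · intro _
            by_cases hc : comb = []
            · have hvf : hv = false := by
                cases hv with
                | false => rfl
                | true => exact absurd hc (hhv.mp rfl)
              rw [pvMinD_append, pvMaxD_append]
              simp [hc, hvf]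
            · have hvt : hv = true := hhv.mpr hc
              obtain ⟨h1, h2⟩ := hmn hc
              rw [pvMinD_append, pvMaxD_append]
              constructor
              · simp only [hvt, if_true, if_neg hc, h1, min_def]
                split <;> split <;> omega
              · simp only [hvt, if_true, if_neg hc, h2, max_def]
                split <;> split <;> omega
          · intro _; exact hcne
        have hskip : pvGoB diff n l r x (pos+1) (rem'+1) s mn mx hv
            = pvN diff n l r x (rem'+1) (pos+1) comb := by
          apply ih (rem'+1) (pos+1) (by omega) comb s mn mx hv hs hhv hmn (by omega)
        conv_lhs => rw [pvGoB]
        simp only [hlt, if_false]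
        rw [htake, hskip]
        conv_rhs => rw [pvN]
        rw [hcons]
        simp only [List.map_cons, List.sum_cons]
        congr 1

-- ===== VERDICT (by name: the statement is the Claim_ definition above) =====
theorem check_combos_spec : Claim_equal_check_combos := by
  intro diff n size start picked total l r x comb _ hpre
  unfold Spec_check_combos check_combos check_combos_alt
  obtain ⟨hp1, hp2, hp3⟩ := hpre
  rcases lt_trichotomy picked size with hlt | heq | hgt
  · -- picked < size
    have hknn : ¬ size - picked < 0 := by omega
    have hk : size - picked = ((size - picked).toNat : Int) := by omega
    rw [pv_lemA diff n size l r x ((size - picked).toNat) start picked total comb hk]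
    simp only [hknn, if_false]
    congr 1
    symm
    apply pv_lemB diff n l r x ((n - start).toNat) _ start (le_refl _) comb
    · rfl
    · by_cases hc : comb = []
      · simp [hc]
      · simp only [hc, ne_eq, not_false_iff, iff_true, decide_eq_true_eq]
        cases comb with
        | nil => exact absurd rfl hc
        | cons a t => simp
    · intro hc
      have hlen : 0 < comb.length := by
        cases comb with
        | nil => exact absurd rfl hc
        | cons a t => simp
      constructor <;> simp [pvMinD, pvMaxD, hlen]
    · intro h0; exfalso; omega
  · -- picked = size
    have hc := hp1 heq
    have hlen : 0 < comb.length := by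
      cases comb with
      | nil => exact absurd rfl hc
      | cons a t => simp
    simp only [heq, sub_self, Int.toNat_zero, lt_irrefl, if_false]
    simp [pvGoA, pvGoB, pvCond, hlen, pvMinD, pvMaxD]
    split <;> simp
  · -- picked > size: pruned range empty, A returns total; B returns total since k < 0
    have hknn : size - picked < 0 := by omega
    have hfuel : (size - picked).toNat = 0 := by omega
    have hne : ¬ (picked == size) = true := by simp; omega
    have hnil : PySem.List.pyRange start (n - (size - picked - 1)) 1 = [] :=
      PySem.List.pyRange_one_eq_nil (by have := hp2 hgt; omega)
    simp [hfuel, pvGoA, hne, hnil, hknn]
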